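-- pv_equiv track=rewrite | github.com/earosselot/Python_UNSAM | ejercicios_python/Clase06/bbin.py | incrementar
-- ===== SOURCE A (Python) =====
-- def incrementar(s):
--     """
--     Calcula la secuencia siguiente de una secuencia dada.
--     Secuencia es una lista de 0's y 1's interpretada en binario
--     """
--     # s = secuencia.copy()
--     carry = 1
--     largo = len(s)
--     for i in range(largo-1, -1, -1):
--         if (s[i] == 1 and carry == 1):
--             s[i] = 0
--             carry = 1
--         else:
--             s[i] = s[i] + carry
--             carry = 0
--     return s
-- ===== SOURCE B (Python) =====
-- def incrementar(s):
--     """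
--     Calcula la secuencia siguiente de una secuencia dada.
--     Secuencia es una lista de 0's y 1's interpretada en binario
--     """
--     # Count the trailing 1s, bulk-zero them, add 1 to the element just before
--     # (an all-1s sequence wraps to all 0s).  Mutates s in place, like A.
--     k = 0
--     for x in reversed(s):
--         if x != 1:
--             break
--         k += 1
--     if k == len(s):
--         s[:] = [0] * len(s)
--     else:
--         s[-k - 1] += 1
--         s[len(s) - k:] = [0] * k
--     return s
-- ===== Notes on version B (the rewrite author's own statement) =====
-- stated objective: simpler
-- what changed: Replaces A's per-element carry-propagation loop (rewriting every position) with: count the trailing 1s, add 1 to the single element just before them, and bulk-zero the trailing run with one slice assignment (an all-1s list wraps to all 0s). C-level slice assignment replaces the Python-level per-element rewrite.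
import Mathlib
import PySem

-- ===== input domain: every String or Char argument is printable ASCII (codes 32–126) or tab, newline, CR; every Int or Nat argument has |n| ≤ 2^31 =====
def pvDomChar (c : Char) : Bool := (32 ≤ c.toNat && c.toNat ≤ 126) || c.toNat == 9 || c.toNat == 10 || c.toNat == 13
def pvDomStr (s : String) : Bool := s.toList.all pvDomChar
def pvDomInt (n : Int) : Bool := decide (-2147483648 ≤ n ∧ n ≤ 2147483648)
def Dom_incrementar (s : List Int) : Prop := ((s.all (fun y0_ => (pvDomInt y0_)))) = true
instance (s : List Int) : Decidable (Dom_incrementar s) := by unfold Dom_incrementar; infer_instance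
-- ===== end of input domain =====

-- B replaces A's per-element carry loop by count-trailing-ones + bulk zeroing + one increment
-- (objective: simpler).  Both Pythons mutate s in place; the equivalence proved is about the
-- returned value (B performs the same in-place mutation).

-- ===== PORT A =====
-- A's for loop runs i = largo-1, …, 0, rewriting s[i] from carry; ported as the obvious
-- right-to-left structural recursion carrying the same state (the updated suffix and carry).
def incrementarGo : List Int → Int → List Int × Int
  | [], carry => ([], carry)
  | x :: t, carry =>
      let r := incrementarGo t carry      -- the loop has already processed indices > i
      if x = 1 ∧ r.2 = 1 then (0 :: r.1, 1)
      else ((x + r.2) :: r.1, 0)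

def incrementar (s : List Int) : List Int := (incrementarGo s 1).1

-- ===== PORT B =====
-- `for x in reversed(s): if x != 1: break; k += 1`
def countTrail : List Int → Nat
  | [] => 0
  | x :: t => if x = 1 then countTrail t + 1 else 0

def incrementar_alt (s : List Int) : List Int :=
  let k := countTrail s.reverse
  if k = s.length then List.replicate s.length 0
  else s.take (s.length - k - 1) ++ [s.getD (s.length - k - 1) 0 + 1] ++ List.replicate k 0

-- ===== PRECONDITION & SPEC =====
def Spec_incrementar (s : List Int) (out : List Int) : Prop := out = incrementar_alt s
instance (s : List Int) (out : List Int) : Decidable (Spec_incrementar s out) := by unfold Spec_incrementar; infer_instance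

-- ===== CLAIM (what is proved, stated in full; the proofs are below) =====
def Claim_equal_incrementar : Prop := ∀ (s : List Int), Dom_incrementar s → Spec_incrementar s (incrementar s)

-- ===== LEMMAS AND PROOFS =====
theorem countTrail_le (l : List Int) : countTrail l ≤ l.length := by
  induction l with
  | nil => simp [countTrail]
  | cons x t ih =>
      simp only [countTrail, List.length_cons]
      split <;> omega

theorem countTrail_append_singleton (l : List Int) (x : Int) :
    countTrail (l ++ [x]) =
      if countTrail l = l.length then (if x = 1 then l.length + 1 else l.length)
      else countTrail l := by
  induction l with
  | nil => simp [countTrail]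
  | cons y t ih =>
      simp only [List.cons_append, countTrail, List.length_cons]
      by_cases hy : y = 1
      · have ht := countTrail_le t
        simp only [hy, ih]
        split_ifs <;> omega
      · simp only [if_neg hy]
        have ht := countTrail_le t
        split_ifs <;> omega

theorem go_spec (s : List Int) :
    incrementarGo s 1 =
      if countTrail s.reverse = s.length
      then (List.replicate s.length 0, 1)
      else (s.take (s.length - countTrail s.reverse - 1) ++
              [s.getD (s.length - countTrail s.reverse - 1) 0 + 1] ++
              List.replicate (countTrail s.reverse) 0, 0) := by
  induction s with
  | nil => simp [incrementarGo, countTrail]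
  | cons x t ih =>
      have hle : countTrail t.reverse ≤ t.length := by
        simpa using countTrail_le t.reverse
      have hk : countTrail (t.reverse ++ [x]) =
          if countTrail t.reverse = t.length then (if x = 1 then t.length + 1 else t.length)
          else countTrail t.reverse := by
        simpa using countTrail_append_singleton t.reverse x
      simp only [List.reverse_cons, List.length_cons, hk]
      by_cases hall : countTrail t.reverse = t.length
      · -- the whole tail is made of 1s: carry comes back as 1
        by_cases hx : x = 1
        · simp [incrementarGo, ih, hall, hx, List.replicate_succ]
        · have hne : ¬ t.length = t.length + 1 := by omega
          simp [incrementarGo, ih, hall, hx]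
      · -- carry already died inside the tail
        have hlt : countTrail t.reverse < t.length := lt_of_le_of_ne hle hall
        set k := countTrail t.reverse with hkdef
        have hne : ¬ k = t.length + 1 := by omega
        have h1 : t.length + 1 - k - 1 = (t.length - k - 1) + 1 := by omega
        have hcond : ¬ (x = 1 ∧ (0 : Int) = 1) := by simp
        simp only [incrementarGo, ih, if_neg hall, if_neg hne, if_neg hcond, h1]
        simp [List.getD]

-- ===== VERDICT (by name: the statement is the Claim_ definition above) =====
theorem incrementar_spec : Claim_equal_incrementar := by
  intro s _
  unfold Spec_incrementar incrementar incrementar_alt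
  rw [go_spec]
  by_cases h : countTrail s.reverse = s.length <;> simp [h]
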